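-- pv_equiv track=rewrite | github.com/Adefebrian/DataFlow | Vibecode/src/api/interactive_charts.py | prioritize_columns
-- ===== SOURCE A (Python) =====
-- from typing import Any, Dict, List, Optional
--
-- PRIORITY_KW = [
--     "revenue",
--     "sales",
--     "profit",
--     "cost",
--     "amount",
--     "price",
--     "quantity",
--     "count",
--     "total",
--     "score",
--     "rate",
--     "margin",
-- ]
--
-- def prioritize_columns(cols: List[str]) -> List[str]:
--     """Reorder columns so PRIORITY_KW matches come first."""
--     selected: List[str] = []
--     rest: List[str] = []
--     for kw in PRIORITY_KW:
--         for col in cols: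
--             if kw in col.lower() and col not in selected:
--                 selected.append(col)
--     for col in cols:
--         if col not in selected:
--             rest.append(col)
--     return selected + rest
-- ===== SOURCE B (Python) =====
-- from typing import List
--
-- PRIORITY_KW = [
--     "revenue",
--     "sales",
--     "profit",
--     "cost",
--     "amount",
--     "price",
--     "quantity",
--     "count",
--     "total",
--     "score",
--     "rate",
--     "margin",
-- ]
--
-- def prioritize_columns(cols: List[str]) -> List[str]:
--     """Reorder columns so PRIORITY_KW matches come first (single pass + buckets)."""
--     buckets = [[] for _ in PRIORITY_KW]
--     rest = []
--     seen = set()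
--     for col in cols:
--         low = col.lower()
--         idx = None
--         for i, kw in enumerate(PRIORITY_KW):
--             if kw in low:
--                 idx = i
--                 break
--         if idx is None:
--             rest.append(col)
--         elif col not in seen:
--             seen.add(col)
--             buckets[idx].append(col)
--     out = []
--     for b in buckets:
--         out.extend(b)
--     out.extend(rest)
--     return out
-- ===== Notes on version B (the rewrite author's own statement) =====
-- stated objective: alternative
-- what changed: A makes one pass over cols per keyword (12 passes), each with a linear 'col not in selected' scan, then a final pass building rest; B makes a single pass over cols, classifying each column by its first matching keyword into per-keyword buckets (deduplicated via a seen set, non-matches appended to rest) and concatenates the buckets and rest.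
import Mathlib
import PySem

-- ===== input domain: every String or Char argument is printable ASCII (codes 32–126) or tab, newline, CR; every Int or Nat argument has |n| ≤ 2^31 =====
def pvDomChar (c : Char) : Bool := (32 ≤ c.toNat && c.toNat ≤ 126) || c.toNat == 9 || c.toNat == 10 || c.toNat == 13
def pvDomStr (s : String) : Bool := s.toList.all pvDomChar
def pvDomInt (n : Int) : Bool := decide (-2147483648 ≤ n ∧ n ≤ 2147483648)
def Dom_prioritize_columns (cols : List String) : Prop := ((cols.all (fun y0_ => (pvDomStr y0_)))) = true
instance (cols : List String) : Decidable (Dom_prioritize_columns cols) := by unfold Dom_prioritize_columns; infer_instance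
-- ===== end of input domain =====

-- B replaces A's twelve passes over cols (each also rescanning the growing `selected` list)
-- by a single classify-into-buckets pass with a `seen` set; objective: alternative decomposition.

-- ===== PORT A =====
def PRIORITY_KW : List String :=
  ["revenue", "sales", "profit", "cost", "amount", "price",
   "quantity", "count", "total", "score", "rate", "margin"]


def prioritize_columns (cols : List String) : List String :=
  let selected : List String :=
    PRIORITY_KW.foldl
      (fun selected kw =>
        cols.foldl
          (fun selected col =>
            if PySem.Str.isIn kw (PySem.Str.lower col) && !(selected.contains col)
            then selected ++ [col] else selected)
          selected)
      []
  let rest : List String :=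
    cols.foldl (fun rest col => if selected.contains col then rest else rest ++ [col]) []
  selected ++ rest

-- ===== PORT B =====
-- Source B's inner `for i, kw in enumerate(PRIORITY_KW): if kw in low: idx = i; break`
def pvFirstKw : List String → String → Nat → Option Nat
  | [], _, _ => none
  | kw :: kws, low, i => if PySem.Str.isIn kw low then some i else pvFirstKw kws low (i + 1)

-- one iteration of Source B's single loop over cols; state = (buckets, rest, seen)

def pvStepB (st : List (List String) × List String × PySem.Set String) (col : String) :
    List (List String) × List String × PySem.Set String :=
  match pvFirstKw PRIORITY_KW (PySem.Str.lower col) 0 with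
  | none => (st.1, st.2.1 ++ [col], st.2.2)
  | some i =>
    if PySem.Set.contains st.2.2 col then st
    else (st.1.modify i (· ++ [col]), st.2.1, PySem.Set.add st.2.2 col)

def prioritize_columns_alt (cols : List String) : List String :=
  let st := cols.foldl pvStepB
    (PRIORITY_KW.map (fun _ => ([] : List String)), ([] : List String),
     (PySem.Set.empty : PySem.Set String))
  st.1.flatten ++ st.2.1

-- ===== PRECONDITION & SPEC =====
def Spec_prioritize_columns (cols : List String) (out : List String) : Prop := out = prioritize_columns_alt cols
instance (cols : List String) (out : List String) : Decidable (Spec_prioritize_columns cols out) := by unfold Spec_prioritize_columns; infer_instance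

-- ===== CLAIM (what is proved, stated in full; the proofs are below) =====
def Claim_equal_prioritize_columns : Prop := ∀ (cols : List String), Dom_prioritize_columns cols → Spec_prioritize_columns cols (prioritize_columns cols)

-- ===== LEMMAS AND PROOFS =====

-- index of the first matching keyword for a column (Source B's `idx`)
def fI (c : String) : Option Nat := pvFirstKw PRIORITY_KW (PySem.Str.lower c) 0

-- first occurrences of values satisfying P and not in `seen`, in cols order
def selR (P : String → Bool) (seen : List String) : List String → List String
  | [] => []
  | c :: cs => if P c && !seen.contains c then c :: selR P (seen ++ [c]) cs else selR P seen cs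

def flatK (k : Nat) (cols : List String) : List String :=
  ((List.range k).map (fun j => selR (fun c => fI c == some j) [] cols)).flatten

def seenAfter (seen : PySem.Set String) (l : List String) : PySem.Set String :=
  l.foldl (fun s c => if (fI c).isSome then PySem.Set.add s c else s) seen

lemma pvFirstKw_some (kws : List String) (low : String) :
    ∀ (i j : Nat), pvFirstKw kws low i = some j →
      ∃ t kw, t + i = j ∧ kws[t]? = some kw ∧ PySem.Str.isIn kw low = true := by
  induction kws with
  | nil => intro i j h; simp [pvFirstKw] at h
  | cons kw kws ih =>
    intro i j h
    rw [pvFirstKw] at h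
    by_cases hm : PySem.Str.isIn kw low = true
    · rw [if_pos hm] at h
      injection h with h
      exact ⟨0, kw, by omega, by simp, hm⟩
    · rw [if_neg hm] at h
      obtain ⟨t, kw', ht, hget, hmm⟩ := ih (i+1) j h
      exact ⟨t+1, kw', by omega, by simpa using hget, hmm⟩

lemma pvFirstKw_of_match (kws : List String) (low : String) :
    ∀ (i k : Nat) (kw : String), kws[k]? = some kw → PySem.Str.isIn kw low = true →
      ∃ j, pvFirstKw kws low i = some j ∧ j ≤ i + k := by
  induction kws with
  | nil => intro i k kw h; simp at h
  | cons kw0 kws ih =>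
    intro i k kw hget hm
    by_cases hm0 : PySem.Str.isIn kw0 low = true
    · exact ⟨i, by rw [pvFirstKw, if_pos hm0], by omega⟩
    · cases k with
      | zero => simp at hget; subst hget; exact absurd hm hm0
      | succ k =>
        simp at hget
        obtain ⟨j, hj, hle⟩ := ih (i+1) k kw hget hm
        exact ⟨j, by rw [pvFirstKw, if_neg hm0, hj], by omega⟩

lemma selR_congr (P : String → Bool) :
    ∀ (l : List String) (s t : List String),
      (∀ c, P c = true → s.contains c = t.contains c) → selR P s l = selR P t l := by
  intro l
  induction l with
  | nil => intro s t _; rfl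
  | cons c cs ih =>
    intro s t h
    rw [selR, selR]
    by_cases hp : P c = true
    · rw [h c hp]
      by_cases ht : t.contains c = true
      · rw [if_neg (by rw [hp, ht]; decide), if_neg (by rw [hp, ht]; decide)]
        exact ih s t h
      · have ht' : t.contains c = false := by simpa using ht
        rw [if_pos (by rw [hp, ht']; rfl), if_pos (by rw [hp, ht']; rfl)]
        congr 1
        apply ih
        intro d hd
        simp only [List.contains_append, h d hd]
    · have hp' : P c = false := by simpa using hp
      rw [if_neg (by rw [hp']; simp), if_neg (by rw [hp']; simp)]
      exact ih s t h

lemma selR_append_irrel {P : String → Bool} {c : String} (hc : P c = false) :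
    ∀ (l s : List String), selR P (s ++ [c]) l = selR P s l := by
  intro l s
  apply selR_congr
  intro d hd
  have hne : d ≠ c := by
    intro h; subst h; exact absurd hd (by simp [hc])
  simp [hne]

lemma mem_selR {P : String → Bool} {c : String} :
    ∀ {l s : List String}, c ∈ selR P s l → P c = true ∧ c ∈ l := by
  intro l
  induction l with
  | nil => intro s h; simp [selR] at h
  | cons c0 cs ih =>
    intro s h
    rw [selR] at h
    split at h
    · rcases List.mem_cons.mp h with rfl | h
      · rename_i hg; simp at hg; exact ⟨hg.1, by simp⟩
      · obtain ⟨h1, h2⟩ := ih h; exact ⟨h1, by simp [h2]⟩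
    · obtain ⟨h1, h2⟩ := ih h; exact ⟨h1, by simp [h2]⟩

lemma mem_selR_of {P : String → Bool} {c : String} :
    ∀ {l s : List String}, c ∈ l → P c = true → s.contains c = false → c ∈ selR P s l := by
  intro l
  induction l with
  | nil => intro s h; simp at h
  | cons c0 cs ih =>
    intro s hmem hp hs
    rcases List.mem_cons.mp hmem with rfl | hmem
    · rw [selR]
      have hns : c ∉ s := by simpa using hs
      simp [hp, hns]
    · rw [selR]
      split
      · by_cases he : c = c0
        · subst he; exact List.mem_cons_self ..
        · refine List.mem_cons_of_mem _ (ih hmem hp ?_)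
          simp [he]
          simpa using hs
      · exact ih hmem hp hs

lemma A_inner (p : String → Bool) :
    ∀ (l sel : List String),
      l.foldl (fun s c => if p c && !s.contains c then s ++ [c] else s) sel = sel ++ selR p sel l := by
  intro l
  induction l with
  | nil => intro sel; simp [selR]
  | cons c cs ih =>
    intro sel
    rw [List.foldl_cons, selR]
    split
    · rw [ih (sel ++ [c])]; simp
    · exact ih sel

lemma fI_match {c : String} {j : Nat} (h : fI c = some j) :
    ∃ kw, PRIORITY_KW[j]? = some kw ∧ PySem.Str.isIn kw (PySem.Str.lower c) = true := by
  obtain ⟨t, kw, ht, hget, hm⟩ := pvFirstKw_some PRIORITY_KW (PySem.Str.lower c) 0 j h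
  exact ⟨kw, by simpa [← ht] using hget, hm⟩

lemma fI_of_match {c : String} {k : Nat} {kw : String}
    (hkw : PRIORITY_KW[k]? = some kw) (hm : PySem.Str.isIn kw (PySem.Str.lower c) = true) :
    ∃ j, fI c = some j ∧ j ≤ k := by
  obtain ⟨j, hj, hle⟩ := pvFirstKw_of_match PRIORITY_KW (PySem.Str.lower c) 0 k kw hkw hm
  exact ⟨j, hj, by omega⟩

lemma inner_eq (p q : String → Bool) :
    ∀ (l sel seen : List String),
      (∀ c ∈ l, q c = true → p c = true) →
      (∀ c ∈ l, p c = true → sel.contains c = (!(q c) || seen.contains c)) →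
      selR p sel l = selR q seen l := by
  intro l
  induction l with
  | nil => intro sel seen _ _; rfl
  | cons c cs ih =>
    intro sel seen hpq H
    rw [selR, selR]
    by_cases hp : p c = true
    · have hc := H c (by simp) hp
      by_cases hq : q c = true
      · by_cases hs : seen.contains c = true
        · rw [if_neg (by rw [hp, hc, hq, hs]; decide), if_neg (by rw [hq, hs]; decide)]
          exact ih sel seen (fun d hd => hpq d (by simp [hd]))
            (fun d hd => H d (by simp [hd]))
        · have hs' : seen.contains c = false := by simpa using hs
          rw [if_pos (by rw [hp, hc, hq, hs']; rfl), if_pos (by rw [hq, hs']; rfl)]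
          congr 1
          apply ih
          · exact fun d hd => hpq d (by simp [hd])
          · intro d hd hpd
            rw [List.contains_append, List.contains_append, H d (by simp [hd]) hpd,
              Bool.or_assoc]
      · have hq' : q c = false := by simpa using hq
        have hsel : sel.contains c = true := by rw [hc, hq']; simp
        rw [if_neg (by rw [hp, hsel]; decide), if_neg (by rw [hq']; simp)]
        exact ih sel seen (fun d hd => hpq d (by simp [hd])) (fun d hd => H d (by simp [hd]))
    · have hp' : p c = false := by simpa using hp
      have hq' : q c = false := by
        by_cases h : q c = true
        · exact absurd (hpq c (by simp) h) (by simp [hp'])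
        · simpa using h
      rw [if_neg (by rw [hp']; simp), if_neg (by rw [hq']; simp)]
      exact ih sel seen (fun d hd => hpq d (by simp [hd])) (fun d hd => H d (by simp [hd]))

lemma mem_flatK {c : String} {k : Nat} {cols : List String} :
    c ∈ flatK k cols ↔ ∃ j < k, c ∈ selR (fun d => fI d == some j) [] cols := by
  simp only [flatK, List.mem_flatten, List.mem_map, List.mem_range]
  constructor
  · rintro ⟨l, ⟨j, hj, rfl⟩, hc⟩; exact ⟨j, hj, hc⟩
  · rintro ⟨j, hj, hc⟩; exact ⟨_, ⟨j, hj, rfl⟩, hc⟩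

lemma step_full (k : Nat) (kw : String) (hkw : PRIORITY_KW[k]? = some kw) (cols : List String) :
    cols.foldl
      (fun s c => if PySem.Str.isIn kw (PySem.Str.lower c) && !s.contains c then s ++ [c] else s)
      (flatK k cols) = flatK (k + 1) cols := by
  rw [A_inner]
  have hsel : selR (fun c => PySem.Str.isIn kw (PySem.Str.lower c)) (flatK k cols) cols
      = selR (fun c => fI c == some k) [] cols := by
    apply inner_eq
    · intro c _ hq
      have hfi : fI c = some k := by simpa using hq
      obtain ⟨kw', hkw', hm⟩ := fI_match hfi
      rw [hkw] at hkw'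
      injection hkw' with hkw'
      rw [hkw']
      exact hm
    · intro c hc hp
      obtain ⟨j, hj, hle⟩ := fI_of_match hkw hp
      by_cases hjk : j = k
      · subst hjk
        have h1 : (fI c == some j) = true := by simp [hj]
        rw [h1]
        simp only [Bool.not_true, List.contains_nil, Bool.or_false]
        -- goal: (flatK j cols).contains c = false
        by_cases h : (flatK j cols).contains c = true
        · exfalso
          have : c ∈ flatK j cols := by simpa using h
          obtain ⟨j', hj', hmem⟩ := mem_flatK.mp this
          have := (mem_selR hmem).1
          simp [hj] at this
          omega
        · simpa using h
      · have h1 : (fI c == some k) = false := by simp [hj]; omega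
        rw [h1]
        simp only [Bool.not_false, Bool.true_or]
        have : c ∈ flatK k cols := by
          apply mem_flatK.mpr
          exact ⟨j, by omega, mem_selR_of hc (by simp [hj]) rfl⟩
        simpa using this
  rw [hsel]
  rw [flatK, flatK, List.range_succ, List.map_append, List.flatten_append]
  simp

lemma selected_eq (cols : List String) :
    PRIORITY_KW.foldl
      (fun selected kw =>
        cols.foldl
          (fun selected col =>
            if PySem.Str.isIn kw (PySem.Str.lower col) && !(selected.contains col)
            then selected ++ [col] else selected)
          selected)
      [] = flatK 12 cols := by
  simp only [PRIORITY_KW, List.foldl_cons, List.foldl_nil]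
  rw [show cols.foldl
      (fun s c => if PySem.Str.isIn "revenue" (PySem.Str.lower c) && !s.contains c then s ++ [c] else s)
      ([] : List String) = flatK 1 cols from step_full 0 "revenue" rfl cols,
    step_full 1 "sales" rfl, step_full 2 "profit" rfl,
    step_full 3 "cost" rfl, step_full 4 "amount" rfl, step_full 5 "price" rfl,
    step_full 6 "quantity" rfl, step_full 7 "count" rfl, step_full 8 "total" rfl,
    step_full 9 "score" rfl, step_full 10 "rate" rfl, step_full 11 "margin" rfl]

lemma contains_flatK12 {c : String} {cols : List String} (hc : c ∈ cols) :
    (flatK 12 cols).contains c = !(fI c == none) := by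
  rcases hfi : fI c with _ | j
  · by_cases h : (flatK 12 cols).contains c = true
    · exfalso
      obtain ⟨j, _, hmem⟩ := mem_flatK.mp (by simpa using h)
      have := (mem_selR hmem).1
      simp [hfi] at this
    · simpa using h
  · have hj : j < 12 := by
      obtain ⟨kw, hkw, _⟩ := fI_match hfi
      have := List.getElem?_eq_some_iff.mp hkw
      simpa [PRIORITY_KW] using this.1
    have : c ∈ flatK 12 cols :=
      mem_flatK.mpr ⟨j, hj, mem_selR_of hc (by simp [hfi]) rfl⟩
    simpa using this

lemma B_fold :
    ∀ (l : List String) (buckets : List (List String)) (rest : List String) (seen : PySem.Set String),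
      l.foldl pvStepB (buckets, rest, seen) =
        (buckets.mapIdx (fun i b => b ++ selR (fun c => fI c == some i) seen l),
         rest ++ l.filter (fun c => fI c == none),
         seenAfter seen l) := by
  intro l
  induction l with
  | nil =>
    intro buckets rest seen
    simp [selR, seenAfter, List.mapIdx_eq_zipIdx_map]
  | cons col cs ih =>
    intro buckets rest seen
    rw [List.foldl_cons]
    rcases hfi : fI col with _ | j
    · have hfi' : pvFirstKw PRIORITY_KW (PySem.Str.lower col) 0 = none := hfi
      rw [show pvStepB (buckets, rest, seen) col = (buckets, rest ++ [col], seen) from by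
        simp [pvStepB, hfi']]
      rw [ih]
      refine Prod.ext ?_ (Prod.ext ?_ ?_)
      · simp only []
        congr 1
        funext i b
        rw [selR, if_neg (by rw [hfi]; simp)]
      · simp only [List.filter_cons, hfi]
        simp
      · simp [seenAfter, hfi]
    · have hfi' : pvFirstKw PRIORITY_KW (PySem.Str.lower col) 0 = some j := hfi
      by_cases hc : PySem.Set.contains seen col = true
      · have hcl : seen.contains col = true := hc
        have hmem : col ∈ seen := List.contains_iff_mem.mp hcl
        rw [show pvStepB (buckets, rest, seen) col = (buckets, rest, seen) from by
          simp [pvStepB, hfi', hmem]]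
        rw [ih]
        refine Prod.ext ?_ (Prod.ext ?_ ?_)
        · simp only []
          congr 1
          funext i b
          rw [selR, if_neg (by simp [hmem])]
        · simp only [List.filter_cons, hfi]
          simp
        · simp [seenAfter, hfi, PySem.Set.add, hmem]
      · have hcl : seen.contains col = false := by simpa using hc
        have hnmem : col ∉ seen := by simpa using hc
        rw [show pvStepB (buckets, rest, seen) col
            = (buckets.modify j (· ++ [col]), rest, PySem.Set.add seen col) from by
          simp [pvStepB, hfi', hnmem]]
        rw [ih]
        have hadd : PySem.Set.add seen col = seen ++ [col] := by
          simp [PySem.Set.add, hnmem]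
        refine Prod.ext ?_ (Prod.ext ?_ ?_)
        · simp only [hadd]
          apply List.ext_getElem
          · simp [List.length_mapIdx, List.length_modify]
          · intro i h1 h2
            rw [List.getElem_mapIdx, List.getElem_mapIdx,
              List.getElem_modify]
            by_cases hij : j = i
            · subst hij
              rw [if_pos rfl, selR, if_pos (by simp [hfi, hnmem])]
              simp
            · rw [if_neg hij, selR, if_neg (by
                intro hgg
                rw [hfi] at hgg
                simp at hgg
                exact hij hgg.1)]
              rw [selR_append_irrel (by simp [hfi]; omega)]
        · simp only [List.filter_cons, hfi]
          simp
        · simp [seenAfter, hfi, hadd]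

lemma alt_eq (cols : List String) :
    prioritize_columns_alt cols = flatK 12 cols ++ cols.filter (fun c => fI c == none) := by
  unfold prioritize_columns_alt
  rw [B_fold]
  have hmi : List.mapIdx (fun i b => b ++ selR (fun c => fI c == some i) PySem.Set.empty cols)
        (PRIORITY_KW.map (fun _ => ([] : List String)))
      = (List.range 12).map (fun j => selR (fun c => fI c == some j) [] cols) := by
    apply List.ext_getElem
    · simp [PRIORITY_KW]
    · intro i h1 h2
      rw [List.getElem_mapIdx]
      simp [PySem.Set.empty]
  simp only [hmi]
  simp [flatK]

lemma a_eq (cols : List String) :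
    prioritize_columns cols = flatK 12 cols ++ cols.filter (fun c => fI c == none) := by
  unfold prioritize_columns
  dsimp only
  rw [selected_eq]
  congr 1
  have hfun : (fun (r : List String) col => if (flatK 12 cols).contains col then r else r ++ [col])
      = (fun r col => if (!(flatK 12 cols).contains col) = true then r ++ [id col] else r) := by
    funext r colx
    by_cases h : (flatK 12 cols).contains colx = true
    · rw [if_pos h, if_neg (by rw [h]; simp)]
    · rw [if_neg h, if_pos (by simp only [Bool.not_eq_true] at h; rw [h]; rfl), id]
    
  rw [hfun, PySem.List.foldl_append_if (fun colx => !(flatK 12 cols).contains colx) id cols []]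
  simp only [List.map_id, List.nil_append]
  apply List.filter_congr
  intro c hc
  rw [contains_flatK12 hc, Bool.not_not]

-- ===== VERDICT (by name: the statement is the Claim_ definition above) =====
theorem prioritize_columns_spec : Claim_equal_prioritize_columns := by
  intro cols _
  unfold Spec_prioritize_columns
  rw [a_eq, alt_eq]
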